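-- pv_equiv track=rewrite | github.com/aorursy/KT_dataset_py | enzolitos_aula-3.py | soma_alternada
-- ===== SOURCE A (Python) =====
-- def soma_alternada(a, b, c):
--
--     soma = 0
--
--     for i in range(0, c):
--
--     # Se número par, soma a*i - b
--
--         if (c%2 == 0):
--
--             soma = soma + (a*i)-b
--
--         # No outro caso, subtrai de soma b*i
--
--         else:
--
--             soma = soma - b*i
--
--     return soma
-- ===== SOURCE B (Python) =====
-- def soma_alternada(a, b, c):
--     n = max(c, 0)
--     g = n * (n - 1) // 2
--     if c % 2 == 0:
--         return a * g - b * n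
--     return -b * g
-- ===== Notes on version B (the rewrite author's own statement) =====
-- stated objective: faster
-- what changed: Replaces the O(c) loop (whose branch condition c%2==0 is loop-invariant) by the closed-form Gauss sum n(n-1)/2 in each branch.
import Mathlib
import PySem

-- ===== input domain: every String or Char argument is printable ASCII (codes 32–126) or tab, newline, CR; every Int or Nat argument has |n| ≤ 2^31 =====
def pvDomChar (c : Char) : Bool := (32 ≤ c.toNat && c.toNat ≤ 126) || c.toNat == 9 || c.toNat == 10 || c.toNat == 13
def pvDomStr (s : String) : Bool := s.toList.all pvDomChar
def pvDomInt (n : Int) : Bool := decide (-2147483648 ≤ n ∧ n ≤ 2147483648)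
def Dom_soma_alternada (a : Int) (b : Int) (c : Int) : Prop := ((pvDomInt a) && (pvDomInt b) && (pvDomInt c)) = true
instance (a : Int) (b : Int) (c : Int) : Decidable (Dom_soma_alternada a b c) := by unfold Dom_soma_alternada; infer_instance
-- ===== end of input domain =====

-- ===== PORT A =====
-- B replaces the O(c) loop by the closed-form Gauss sum (objective: faster, asymptotic).
def soma_alternada (a : Int) (b : Int) (c : Int) : Int :=
  (PySem.List.pyRange 0 c 1).foldl
    (fun soma i => if PySem.Int.mod c 2 == 0 then soma + a * i - b else soma - b * i) 0

-- ===== PORT B =====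
def soma_alternada_alt (a : Int) (b : Int) (c : Int) : Int :=
  let n := max c 0
  let g := PySem.Int.floordiv (n * (n - 1)) 2
  if PySem.Int.mod c 2 == 0 then a * g - b * n else -b * g

-- ===== PRECONDITION & SPEC =====
def Spec_soma_alternada (a : Int) (b : Int) (c : Int) (out : Int) : Prop := out = soma_alternada_alt a b c
instance (a : Int) (b : Int) (c : Int) (out : Int) : Decidable (Spec_soma_alternada a b c out) := by unfold Spec_soma_alternada; infer_instance

-- ===== CLAIM (what is proved, stated in full; the proofs are below) =====
def Claim_equal_soma_alternada : Prop := ∀ (a : Int) (b : Int) (c : Int), Dom_soma_alternada a b c → Spec_soma_alternada a b c (soma_alternada a b c)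

-- ===== LEMMAS AND PROOFS =====

-- Gauss sum for the even-c branch, over range(0, n)
theorem pv_fold_even (a b : Int) (f : Int → Int → Int)
    (hf : ∀ s i, f s i = s + a * i - b) (n : Nat) :
    (PySem.List.pyRange 0 (n : Int) 1).foldl f 0
      = a * ((n * (n - 1) / 2 : Nat) : Int) - b * n := by
  induction n with
  | zero => simp [PySem.List.pyRange_one_eq_nil]
  | succ m ih =>
    rw [show ((m + 1 : Nat) : Int) = (m : Int) + 1 by push_cast; ring,
      PySem.List.pyRange_one_succ_right (by positivity), List.foldl_append]
    simp only [List.foldl, ih, hf]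
    have h1 : (m + 1) * (m + 1 - 1) = m * (m - 1) + 2 * m := by
      rcases m with _ | k
      · rfl
      · simp only [Nat.succ_sub_one]; ring
    rw [h1, Nat.add_mul_div_left _ _ (by norm_num : 0 < 2)]
    push_cast; ring

-- Gauss sum for the odd-c branch
theorem pv_fold_odd (b : Int) (f : Int → Int → Int)
    (hf : ∀ s i, f s i = s - b * i) (n : Nat) :
    (PySem.List.pyRange 0 (n : Int) 1).foldl f 0
      = -b * ((n * (n - 1) / 2 : Nat) : Int) := by
  induction n with
  | zero => simp [PySem.List.pyRange_one_eq_nil]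
  | succ m ih =>
    rw [show ((m + 1 : Nat) : Int) = (m : Int) + 1 by push_cast; ring,
      PySem.List.pyRange_one_succ_right (by positivity), List.foldl_append]
    simp only [List.foldl, ih, hf]
    have h1 : (m + 1) * (m + 1 - 1) = m * (m - 1) + 2 * m := by
      rcases m with _ | k
      · rfl
      · simp only [Nat.succ_sub_one]; ring
    rw [h1, Nat.add_mul_div_left _ _ (by norm_num : 0 < 2)]
    push_cast; ring

theorem pv_main (a b c : Int) : soma_alternada a b c = soma_alternada_alt a b c := by
  unfold soma_alternada
  simp only [soma_alternada_alt]
  by_cases hc : c ≤ 0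
  · rw [PySem.List.pyRange_one_eq_nil hc]
    have hn : max c 0 = 0 := by omega
    simp [hn, PySem.Int.floordiv]
  · have hn : max c 0 = ((c.toNat : Nat) : Int) := by omega
    have hcn : c = ((c.toNat : Nat) : Int) := by omega
    rw [hn]
    have hg : PySem.Int.floordiv (((c.toNat : Nat) : Int) * (((c.toNat : Nat) : Int) - 1)) 2
        = ((c.toNat * (c.toNat - 1) / 2 : Nat) : Int) := by
      rw [PySem.Int.floordiv_eq_ediv_of_pos (by norm_num)]
      rcases Nat.eq_zero_or_pos c.toNat with h0 | h0
      · simp [h0]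
      · rw [show ((c.toNat : Nat) : Int) - 1 = ((c.toNat - 1 : Nat) : Int) by omega,
          ← Nat.cast_mul]
        omega
    rw [hg]
    by_cases hpar : PySem.Int.mod c 2 == 0
    · simp only [hpar, if_true]
      rw [hcn] at hpar ⊢
      exact pv_fold_even a b _ (fun s i => by simp) c.toNat
    · simp only [hpar, Bool.false_eq_true, if_false]
      rw [hcn] at hpar ⊢
      exact pv_fold_odd b _ (fun s i => by simp) c.toNat

-- ===== VERDICT (by name: the statement is the Claim_ definition above) =====
theorem soma_alternada_spec : Claim_equal_soma_alternada := by
  intro a b c _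
  exact pv_main a b c
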